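-- pv_equiv track=rewrite | github.com/LauryGirl/Years-Stadistics | APIproject/questionnaire/backend/poll.py | polls_modify
-- ===== SOURCE A (Python) =====
-- def polls_modify(p, t):
--     polls = {}
--
--     for (student, poll) in p.items():
--         p = {}
--         for values in poll.values():
--             for value in values:
--                 p[value] = ["1"]
--
--         for values in t.values():
--             for value in values:
--                 if (not (value in t.keys())) and (not (value in p.keys())):
--                     p[value] = []
--
--         polls[student] = p
--
--     return polls
-- ===== SOURCE B (Python) =====
-- def polls_modify(p, t):
--     # Hoist the loop-invariant template computation out of the student loop:
--     # collect, in first-occurrence order, the values of t that are not keys of t.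
--     template = []
--     seen = set(t)
--     for values in t.values():
--         for value in values:
--             if value not in seen:
--                 seen.add(value)
--                 template.append(value)
--
--     polls = {}
--     for student, poll in p.items():
--         pv = {value: ["1"] for values in poll.values() for value in values}
--         for value in template:
--             if value not in pv:
--                 pv[value] = []
--         polls[student] = pv
--     return polls
-- ===== Notes on version B (the rewrite author's own statement) =====
-- stated objective: faster
-- what changed: The template (values of t that are not keys of t, deduped in first-occurrence order) is computed once before the student loop with a seen-set, so each student merges a precomputed list instead of rescanning all of t's values with repeated key-membership tests.
import Mathlib
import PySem

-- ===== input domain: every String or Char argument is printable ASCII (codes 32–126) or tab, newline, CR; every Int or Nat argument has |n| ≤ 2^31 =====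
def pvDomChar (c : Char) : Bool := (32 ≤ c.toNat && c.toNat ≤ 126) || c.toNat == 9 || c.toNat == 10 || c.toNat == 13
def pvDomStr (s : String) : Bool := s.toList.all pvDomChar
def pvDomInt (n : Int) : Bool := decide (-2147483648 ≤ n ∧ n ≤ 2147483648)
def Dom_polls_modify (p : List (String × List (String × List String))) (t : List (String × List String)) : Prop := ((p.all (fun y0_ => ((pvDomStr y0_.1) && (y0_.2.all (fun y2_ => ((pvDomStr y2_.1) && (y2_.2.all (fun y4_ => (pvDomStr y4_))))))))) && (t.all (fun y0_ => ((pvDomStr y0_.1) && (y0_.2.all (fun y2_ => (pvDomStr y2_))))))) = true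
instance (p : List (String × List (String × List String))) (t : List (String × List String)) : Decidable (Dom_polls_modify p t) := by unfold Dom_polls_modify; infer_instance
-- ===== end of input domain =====

-- B hoists the loop-invariant template (values of t that are not keys of t, deduped in
-- first-occurrence order) out of the per-student loop; return values are proved equal (A's
-- rebinding of the parameter name `p` inside its loop does not affect the iteration).

-- ===== PORT A =====
-- literal transliteration of A: for each student build pv from poll's values, then rescan
-- all of t's values, inserting [] when the value is neither a key of t nor already in pv.
def polls_modify (p : List (String × List (String × List String))) (t : List (String × List String)) : List (String × List (String × List String)) :=
  (p.foldl
    (fun (polls : PySem.Dict String (List (String × List String))) sp =>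
      let pv : PySem.Dict String (List String) :=
        sp.2.foldl
          (fun pv kv => kv.2.foldl (fun pv value => pv.insert value ["1"]) pv)
          PySem.Dict.empty
      let pv :=
        t.foldl
          (fun pv kv =>
            kv.2.foldl
              (fun pv value =>
                if !((t.map Prod.fst).contains value) && !(pv.contains value) then
                  pv.insert value []
                else pv)
              pv)
          pv
      polls.insert sp.1 pv.items)
    PySem.Dict.empty).items

-- ===== PORT B =====
-- B-side helper: the template — values of t that are not keys of t, first occurrences in order.
def pvTemplate (t : List (String × List String)) : List String :=
  (t.foldl
    (fun (st : PySem.Set String × List String) kv =>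
      kv.2.foldl
        (fun st value =>
          if st.1.contains value then st
          else (PySem.Set.add st.1 value, st.2 ++ [value]))
        st)
    (PySem.Set.ofList (t.map Prod.fst), [])).2

def polls_modify_alt (p : List (String × List (String × List String))) (t : List (String × List String)) : List (String × List (String × List String)) :=
  let template := pvTemplate t
  (p.foldl
    (fun (polls : PySem.Dict String (List (String × List String))) sp =>
      let pv : PySem.Dict String (List String) :=
        sp.2.foldl
          (fun pv kv => kv.2.foldl (fun pv value => pv.insert value ["1"]) pv)
          PySem.Dict.empty
      let pv :=
        template.foldl
          (fun pv value => if pv.contains value then pv else pv.insert value [])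
          pv
      polls.insert sp.1 pv.items)
    PySem.Dict.empty).items

-- ===== PRECONDITION & SPEC =====
def Spec_polls_modify (p : List (String × List (String × List String))) (t : List (String × List String)) (out : List (String × List (String × List String))) : Prop := out = polls_modify_alt p t
instance (p : List (String × List (String × List String))) (t : List (String × List String)) (out : List (String × List (String × List String))) : Decidable (Spec_polls_modify p t out) := by unfold Spec_polls_modify; infer_instance

-- ===== CLAIM (what is proved, stated in full; the proofs are below) =====
def Claim_equal_polls_modify : Prop := ∀ (p : List (String × List (String × List String))) (t : List (String × List String)), Dom_polls_modify p t → Spec_polls_modify p t (polls_modify p t)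

-- ===== LEMMAS AND PROOFS =====

-- A's per-occurrence step during the t-rescan (T = t.keys).
def pvStepA (T : List String) (pv : PySem.Dict String (List String)) (v : String) : PySem.Dict String (List String) :=
  if !(T.contains v) && !(pv.contains v) then pv.insert v [] else pv

-- B's per-template-entry step.
def pvStepB (pv : PySem.Dict String (List String)) (v : String) : PySem.Dict String (List String) :=
  if pv.contains v then pv else pv.insert v []

-- B's template step on the (seen, acc) pair.
def pvTStep (st : PySem.Set String × List String) (v : String) : PySem.Set String × List String :=
  if st.1.contains v then st else (PySem.Set.add st.1 v, st.2 ++ [v])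

-- a nested foldl over the second components is a foldl over the flattened values
theorem pvFoldl_rows {α : Type} (f : α → String → α) (rows : List (String × List String)) (a : α) :
    rows.foldl (fun acc kv => kv.2.foldl f acc) a = ((rows.map Prod.snd).flatten).foldl f a := by
  induction rows generalizing a with
  | nil => rfl
  | cons kv rest ih => simp [List.foldl_append, ih]

-- the accumulated template list factors out of pvTStep folds
theorem pvTStep_acc (L : List String) (s : PySem.Set String) (acc : List String) :
    L.foldl pvTStep (s, acc) =
      ((L.foldl pvTStep (s, [])).1, acc ++ (L.foldl pvTStep (s, [])).2) := by
  induction L generalizing s acc with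
  | nil => simp
  | cons v L ih =>
    simp only [List.foldl_cons, pvTStep]
    by_cases h : s.contains v = true
    · rw [if_pos h, if_pos h]
      exact ih s acc
    · rw [if_neg h, if_neg h]
      rw [ih (PySem.Set.add s v) (acc ++ [v]), ih (PySem.Set.add s v) ([] ++ [v])]
      simp

-- core: A's rescan of the flat occurrence list equals B's fold over the template built
-- from the same list, provided everything `seen` is a key of t or already in pv.
theorem pvCore (T : List String) (L : List String) :
    ∀ (seen : PySem.Set String) (pv : PySem.Dict String (List String)),
    (∀ v ∈ T, v ∈ seen) →
    (∀ v ∈ seen, v ∈ T ∨ pv.contains v = true) →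
    L.foldl (pvStepA T) pv = (L.foldl pvTStep (seen, [])).2.foldl pvStepB pv := by
  induction L with
  | nil => intros; rfl
  | cons v L ih =>
    intro seen pv h1 h2
    by_cases hs : seen.contains v = true
    · have hv : v ∈ seen := by
        simpa using hs
      have hA : pvStepA T pv v = pv := by
        rcases h2 v hv with hT | hpv
        · simp [pvStepA, hT]
        · simp [pvStepA, hpv]
      simp only [List.foldl_cons, pvTStep, hs, if_true, hA]
      exact ih seen pv h1 h2
    · have hvs : v ∉ seen := by
        simpa using hs
      have hvT : v ∉ T := fun hvT => hvs (h1 v hvT)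
      have hbs : seen.contains v = false := by simpa using hs
      have hA : pvStepA T pv v = pvStepB pv v := by
        cases hc : pv.contains v <;> simp [pvStepA, pvStepB, hc, hvT]
      simp only [List.foldl_cons, pvTStep, hbs, Bool.false_eq_true, if_false, List.nil_append]
      rw [pvTStep_acc L (PySem.Set.add seen v) [v]]
      simp only [List.singleton_append, List.foldl_cons]
      rw [hA]
      apply ih
      · intro u hu
        exact (PySem.Set.mem_add _ _ _).2 (Or.inl (h1 u hu))
      · intro u hu
        rcases (PySem.Set.mem_add _ _ _).1 hu with hu | hu
        · rcases h2 u hu with hT | hpv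
          · exact Or.inl hT
          · right
            unfold pvStepB
            split
            · exact hpv
            · simpa [PySem.Dict.contains_insert] using Or.inr hpv
        · subst hu
          right
          unfold pvStepB
          split
          · assumption
          · simp [PySem.Dict.contains_insert_self]

-- the two per-student bodies agree
theorem pvPhase_eq (t : List (String × List String)) (pv : PySem.Dict String (List String)) :
    t.foldl
      (fun pv kv =>
        kv.2.foldl
          (fun pv value =>
            if !((t.map Prod.fst).contains value) && !(pv.contains value) then
              pv.insert value []
            else pv)
          pv)
      pv
    = (pvTemplate t).foldl (fun pv value => if pv.contains value then pv else pv.insert value []) pv := by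
  have hA := pvFoldl_rows (pvStepA (t.map Prod.fst)) t pv
  have hB := pvFoldl_rows pvTStep t (PySem.Set.ofList (t.map Prod.fst), ([] : List String))
  have hcore := pvCore (t.map Prod.fst) ((t.map Prod.snd).flatten)
      (PySem.Set.ofList (t.map Prod.fst)) pv
      (fun v hv => (PySem.Set.mem_ofList _ _).2 hv)
      (fun v hv => Or.inl ((PySem.Set.mem_ofList _ _).1 hv))
  show t.foldl (fun pv kv => kv.2.foldl (pvStepA (t.map Prod.fst)) pv) pv
      = (pvTemplate t).foldl pvStepB pv
  rw [hA, hcore]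
  unfold pvTemplate
  exact congrArg (fun st : PySem.Set String × List String => List.foldl pvStepB pv st.2) hB.symm

-- ===== VERDICT (by name: the statement is the Claim_ definition above) =====
theorem polls_modify_spec : Claim_equal_polls_modify := by
  intro p t _
  show polls_modify p t = polls_modify_alt p t
  simp only [polls_modify, polls_modify_alt]
  congr 1
  apply List.foldl_ext
  intro polls sp _
  dsimp only
  rw [pvPhase_eq]
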